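-- pv_equiv track=rewrite | github.com/leeminHong1990/PaoDeKuai | kbengine/assets/scripts/common/utility.py | makeKeyCardFourBring
-- ===== SOURCE A (Python) =====
-- import copy
--
-- def getCard2NumDict(cards):
--     card2NumDict = {}
--     for t in cards:
--         if t not in card2NumDict:
--             card2NumDict[t] = 1
--         else:
--             card2NumDict[t] += 1
--     return card2NumDict
--
-- def makeKeyCardFourBring(originCardsButKey, originKeys):
--     makeCards = copy.deepcopy(originCardsButKey)
--     shiftCards = rightShiftCards(originCardsButKey)
--     shiftCards = sorted(shiftCards)
--     keyCardNum = len(originKeys)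
--
--     suggestList = []
--     card2NumDict = getCard2NumDict(shiftCards)
--     keyList = card2NumDict.keys()
--     keyList = sorted(keyList)
--     for i in range(len(keyList)):
--         tempList = []
--         if (4 - card2NumDict[keyList[i]]) <= keyCardNum:
--             for j in range(4 - card2NumDict[keyList[i]]):
--                 tempList.append(keyList[i] << 3)
--             suggestList = tempList
--
--     makeCards.extend(suggestList)
--     makeCards = sorted(makeCards)
--     return makeCards
--
-- def rightShiftCards(cards):
--     result = [0] * len(cards)
--     for i in range(len(cards)):
--         result[i] = cards[i] >> 3
--     return result
-- ===== SOURCE B (Python) =====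
-- def makeKeyCardFourBring(originCardsButKey, originKeys):
--     need = 4 - len(originKeys)
--     shifted = sorted((c >> 3 for c in originCardsButKey), reverse=True)
--     sugg = []
--     i, n = 0, len(shifted)
--     while i < n:
--         j = i
--         while j < n and shifted[j] == shifted[i]:
--             j += 1
--         if j - i >= need:
--             sugg = [shifted[i] << 3] * (4 - (j - i))
--             break
--         i = j
--     return sorted(originCardsButKey + sugg)
-- ===== Notes on version B (the rewrite author's own statement) =====
-- stated objective: alternative
-- what changed: Replaces A's dict-counting plus a scan over all sorted distinct keys that keeps overwriting the suggestion with a sort-then-run-scan: sort the shifted cards descending and walk consecutive runs, stopping at the first run long enough to qualify (the maximum qualifying key); no frequency dict, no key list, no deepcopy, no redundant second sort.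
import Mathlib
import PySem

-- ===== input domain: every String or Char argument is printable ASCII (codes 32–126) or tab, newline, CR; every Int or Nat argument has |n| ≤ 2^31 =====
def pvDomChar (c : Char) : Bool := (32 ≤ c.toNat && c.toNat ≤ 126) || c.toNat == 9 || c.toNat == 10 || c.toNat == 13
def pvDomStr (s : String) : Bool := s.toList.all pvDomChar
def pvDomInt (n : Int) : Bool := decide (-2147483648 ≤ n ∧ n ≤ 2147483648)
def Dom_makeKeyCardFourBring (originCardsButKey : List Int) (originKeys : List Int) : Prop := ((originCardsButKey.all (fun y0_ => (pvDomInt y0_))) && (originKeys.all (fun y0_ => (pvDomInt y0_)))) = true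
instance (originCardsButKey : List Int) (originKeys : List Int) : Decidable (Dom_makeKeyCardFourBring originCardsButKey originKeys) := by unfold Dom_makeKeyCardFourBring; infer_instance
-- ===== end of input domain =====

-- B replaces A's frequency dict and scan over all sorted keys by a descending sort of the
-- shifted cards and a run scan that stops at the first (= maximal) qualifying run ('alternative').

-- ===== PORT A =====
def rightShiftCards (cards : List Int) : List Int :=
  cards.map (fun c : Int => c >>> (3 : Nat))

def getCard2NumDict (cards : List Int) : PySem.Dict Int Int :=
  cards.foldl (fun d t =>
    if !d.contains t then d.insert t 1 else d.insert t (d.getD t 0 + 1))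
    PySem.Dict.empty

def makeKeyCardFourBring (originCardsButKey : List Int) (originKeys : List Int) : List Int :=
  let makeCards := originCardsButKey
  let shiftCards := rightShiftCards originCardsButKey
  let shiftCards := PySem.List.sorted shiftCards (fun x => x) false
  let keyCardNum : Int := originKeys.length
  let card2NumDict := getCard2NumDict shiftCards
  let keyList := card2NumDict.keys
  let keyList := PySem.List.sorted keyList (fun x => x) false
  let suggestList : List Int :=
    (PySem.List.pyRange 0 (PySem.List.len keyList)).foldl (fun sl i =>
      let k := PySem.List.pyGetD keyList i 0
      if 4 - card2NumDict.getD k 0 ≤ keyCardNum then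
        (PySem.List.pyRange 0 (4 - card2NumDict.getD k 0)).foldl
          (fun tl _ => tl ++ [k <<< (3 : Nat)]) []
      else sl) []
  PySem.List.sorted (makeCards ++ suggestList) (fun x => x) false

-- ===== PORT B =====
-- the inner while loop of Source B: the current run is the equal prefix (takeWhile), the outer
-- loop advances past it (dropWhile) until a run of length ≥ need is found
def scanRuns (need : Int) : List Int → List Int
  | [] => []
  | x :: t =>
    let run := ((x :: t).takeWhile (fun y => y == x)).length
    if need ≤ (run : Int) then List.replicate (4 - (run : Int)).toNat (x <<< (3 : Nat))
    else scanRuns need ((x :: t).dropWhile (fun y => y == x))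
termination_by l => l.length
decreasing_by
  simp only [List.dropWhile_cons, beq_self_eq_true, if_true, List.length_cons]
  have h := List.length_dropWhile_le (fun y => y == x) t
  omega

def makeKeyCardFourBring_alt (originCardsButKey : List Int) (originKeys : List Int) : List Int :=
  let need : Int := 4 - (originKeys.length : Int)
  let shifted := PySem.List.sorted (originCardsButKey.map (fun c : Int => c >>> (3 : Nat)))
    (fun x => x) true
  let sugg := scanRuns need shifted
  PySem.List.sorted (originCardsButKey ++ sugg) (fun x => x) false

-- ===== PRECONDITION & SPEC =====
def Spec_makeKeyCardFourBring (originCardsButKey : List Int) (originKeys : List Int) (out : List Int) : Prop := out = makeKeyCardFourBring_alt originCardsButKey originKeys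
instance (originCardsButKey : List Int) (originKeys : List Int) (out : List Int) : Decidable (Spec_makeKeyCardFourBring originCardsButKey originKeys out) := by unfold Spec_makeKeyCardFourBring; infer_instance

-- ===== CLAIM (what is proved, stated in full; the proofs are below) =====
def Claim_equal_makeKeyCardFourBring : Prop := ∀ (originCardsButKey : List Int) (originKeys : List Int), Dom_makeKeyCardFourBring originCardsButKey originKeys → Spec_makeKeyCardFourBring originCardsButKey originKeys (makeKeyCardFourBring originCardsButKey originKeys)

-- ===== LEMMAS AND PROOFS =====

-- A's count dict is Counter: when the key is absent, getD is 0, so both branches insert getD+1.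
theorem getCard2NumDict_eq_counter (xs : List Int) :
    getCard2NumDict xs = PySem.Dict.counter xs := by
  unfold getCard2NumDict
  rw [← PySem.Dict.foldl_insert_getD_add_one_eq_counter]
  apply PySem.List.foldl_congr_mem
  intro d t _
  by_cases h : d.contains t = true
  · simp [h]
  · have h0 : d.getD t 0 = 0 := by
      have := (PySem.Dict.get?_eq_none_iff_contains d t).mpr (by simpa using h)
      simp [PySem.Dict.getD, this]
    simp [h, h0]

-- A's inner append loop builds the replicate.
theorem repeat_loop_eq_replicate (n v : Int) :
    (PySem.List.pyRange 0 n).foldl (fun tl _ => tl ++ [v]) ([] : List Int)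
      = List.replicate n.toNat v := by
  rw [PySem.List.foldl_append_singleton_eq_map (f := fun _ => v)]
  simp [List.map_const', PySem.List.length_pyRange_one]

-- A's overwrite loop keeps the LAST qualifying key's suggestion.
theorem overwrite_loop_eq_getLast (L : List Int) (P : Int → Prop) [DecidablePred P]
    (g : Int → List Int) (init : List Int) :
    L.foldl (fun sl k => if P k then g k else sl) init
      = match (L.filter (fun k => decide (P k))).getLast? with
        | some m => g m
        | none => init := by
  induction L using List.reverseRecOn generalizing init with
  | nil => rfl
  | append_singleton t x ih =>
    rw [List.foldl_append, List.filter_append]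
    by_cases hx : P x
    · simp [hx]
    · simp only [List.foldl_cons, List.foldl_nil, if_neg hx, List.filter_cons, List.filter_nil]
      simpa [hx] using ih init

-- the last element of a strictly increasing list bounds all of it
theorem getLast_is_max (L : List Int) (hL : L.Pairwise (· < ·)) {m : Int}
    (h : L.getLast? = some m) : ∀ y ∈ L, y ≤ m := by
  induction L with
  | nil => simp at h
  | cons x t ih =>
    intro y hy
    cases t with
    | nil => simp_all
    | cons a s =>
      have hlast : (a :: s).getLast? = some m := by
        rw [List.getLast?_cons_cons] at h; exact h
      have hm : m ∈ a :: s := List.mem_of_getLast? hlast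
      rcases List.mem_cons.mp hy with rfl | hy'
      · exact le_of_lt ((List.pairwise_cons.mp hL).1 m hm)
      · exact ih (List.pairwise_cons.mp hL).2 hlast y hy'

-- == B-side lemmas: the run scan on a descending list ==

-- on a descending list dominated by x, the equal-to-x prefix is the whole multiplicity of x,
-- and everything after it is strictly below x
theorem desc_run (x : Int) (l : List Int)
    (h : l.Pairwise (fun a b : Int => b ≤ a)) (hx : ∀ y ∈ l, y ≤ x) :
    ((l.takeWhile (fun y => y == x)).length : Int) = l.count x
      ∧ ∀ y ∈ l.dropWhile (fun y => y == x), y < x := by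
  induction l with
  | nil => simp
  | cons a t ih =>
    rcases List.pairwise_cons.mp h with ⟨ha, ht⟩
    by_cases hax : a = x
    · subst hax
      have hx' : ∀ y ∈ t, y ≤ a := ha
      rcases ih ht hx' with ⟨h1, h2⟩
      constructor
      · simp only [List.takeWhile_cons, beq_self_eq_true, List.count_cons]
        push_cast
        simp only [List.length_cons]
        push_cast
        omega
      · simpa [List.dropWhile_cons, beq_self_eq_true] using h2
    · have halt : a < x := lt_of_le_of_ne (hx a (List.mem_cons_self)) hax
      have hnot : ∀ y ∈ a :: t, y < x := by
        intro y hy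
        rcases List.mem_cons.mp hy with rfl | hy'
        · exact halt
        · exact lt_of_le_of_lt (ha y hy') halt
      have hcnt : (a :: t).count x = 0 := by
        rw [List.count_eq_zero]
        intro hmem
        exact absurd rfl (ne_of_lt (hnot x hmem))
      constructor
      · simp [hax, hcnt]
      · intro y hy
        exact hnot y ((List.dropWhile_sublist _).mem hy)

-- dropping the x-run does not change the count of any other value
theorem count_dropWhile_eq (x y : Int) (l : List Int) (hy : y ≠ x) :
    (l.dropWhile (fun z => z == x)).count y = l.count y := by
  conv_rhs => rw [← List.takeWhile_append_dropWhile (p := fun z : Int => z == x) (l := l)]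
  rw [List.count_append]
  have h0 : (l.takeWhile (fun z : Int => z == x)).count y = 0 := by
    rw [List.count_eq_zero]
    intro hmem
    have := List.mem_takeWhile_imp hmem
    simp only [beq_iff_eq] at this
    exact hy this
  omega

-- unfolding equations of the run scan
theorem scanRuns_nil (need : Int) : scanRuns need [] = [] := by rw [scanRuns]

theorem scanRuns_cons (need x : Int) (t : List Int) : scanRuns need (x :: t) =
    (let run := ((x :: t).takeWhile (fun y => y == x)).length
     if need ≤ (run : Int) then List.replicate (4 - (run : Int)).toNat (x <<< (3 : Nat))
     else scanRuns need ((x :: t).dropWhile (fun y => y == x))) := by rw [scanRuns]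

-- no run qualifies: the scan returns []
theorem scanRuns_none_aux (need : Int) (n : Nat) : ∀ (l : List Int), l.length ≤ n →
    l.Pairwise (fun a b : Int => b ≤ a) →
    (∀ y ∈ l, ¬ need ≤ (l.count y : Int)) → scanRuns need l = [] := by
  induction n with
  | zero =>
    intro l hl _ _
    have : l = [] := List.length_eq_zero_iff.mp (Nat.le_zero.mp hl)
    rw [this, scanRuns_nil]
  | succ n ih =>
    intro l hl h hq
    cases l with
    | nil => exact scanRuns_nil need
    | cons x t =>
      have hx : ∀ y ∈ x :: t, y ≤ x := by
        intro y hy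
        rcases List.mem_cons.mp hy with rfl | hy'
        · exact le_refl _
        · exact (List.pairwise_cons.mp h).1 y hy'
      rcases desc_run x (x :: t) h hx with ⟨hrun, hdw⟩
      have hcond : ¬ need ≤ ((((x :: t).takeWhile (fun y => y == x)).length : Nat) : Int) := by
        rw [hrun]; exact hq x List.mem_cons_self
      rw [scanRuns_cons]
      simp only [if_neg hcond]
      set dw := (x :: t).dropWhile (fun y => y == x) with hdwdef
      have hsub : dw.Sublist (x :: t) := by rw [hdwdef]; exact List.dropWhile_sublist _
      have hlen : dw.length ≤ n := by
        have h1 : dw.length ≤ t.length := by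
          rw [hdwdef]
          simp only [List.dropWhile_cons, beq_self_eq_true, if_true]
          exact List.length_dropWhile_le _ _
        simp only [List.length_cons] at hl
        omega
      apply ih dw hlen (List.Pairwise.sublist hsub h)
      intro y hy
      have hylt : y < x := hdw y hy
      rw [hdwdef, count_dropWhile_eq x y _ (ne_of_lt hylt)]
      exact hq y (hsub.mem hy)

theorem scanRuns_none (need : Int) (l : List Int)
    (h : l.Pairwise (fun a b : Int => b ≤ a))
    (hq : ∀ y ∈ l, ¬ need ≤ (l.count y : Int)) : scanRuns need l = [] :=
  scanRuns_none_aux need l.length l (le_refl _) h hq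

-- m is the maximal qualifying value: the scan stops at m's run
theorem scanRuns_some_aux (need m : Int) (n : Nat) : ∀ (l : List Int), l.length ≤ n →
    l.Pairwise (fun a b : Int => b ≤ a) → m ∈ l →
    need ≤ (l.count m : Int) →
    (∀ y ∈ l, need ≤ (l.count y : Int) → y ≤ m) →
    scanRuns need l = List.replicate (4 - (l.count m : Int)).toNat (m <<< (3 : Nat)) := by
  induction n with
  | zero =>
    intro l hl _ hm _ _
    have : l = [] := List.length_eq_zero_iff.mp (Nat.le_zero.mp hl)
    rw [this] at hm; simp at hm
  | succ n ih =>
    intro l hl h hm hqm hmax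
    cases l with
    | nil => simp at hm
    | cons x t =>
      have hx : ∀ y ∈ x :: t, y ≤ x := by
        intro y hy
        rcases List.mem_cons.mp hy with rfl | hy'
        · exact le_refl _
        · exact (List.pairwise_cons.mp h).1 y hy'
      rcases desc_run x (x :: t) h hx with ⟨hrun, hdw⟩
      rw [scanRuns_cons]
      by_cases hc : need ≤ ((((x :: t).takeWhile (fun y => y == x)).length : Nat) : Int)
      · -- head run qualifies: x is the maximal qualifying value, so m = x
        have hxq : need ≤ (((x :: t).count x : Nat) : Int) := by rw [← hrun]; exact hc
        have hmex : m = x := le_antisymm (hx m hm) (hmax x List.mem_cons_self hxq)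
        simp only [if_pos hc]
        rw [hmex, ← hrun]
      · -- head run too short: m is further down, recurse past the run
        have hmne : m ≠ x := by
          intro he
          apply hc
          rw [hrun]
          rw [he] at hqm
          exact hqm
        simp only [if_neg hc]
        set dw := (x :: t).dropWhile (fun y => y == x) with hdwdef
        have hsub : dw.Sublist (x :: t) := by rw [hdwdef]; exact List.dropWhile_sublist _
        have hlen : dw.length ≤ n := by
          have h1 : dw.length ≤ t.length := by
            rw [hdwdef]
            simp only [List.dropWhile_cons, beq_self_eq_true, if_true]
            exact List.length_dropWhile_le _ _
          simp only [List.length_cons] at hl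
          omega
        have hmdw : m ∈ dw := by
          have hsplit := List.takeWhile_append_dropWhile (p := fun y : Int => y == x) (l := x :: t)
          have hmem2 : m ∈ (x :: t).takeWhile (fun y => y == x) ++ dw := by
            rw [hdwdef, hsplit]; exact hm
          rcases List.mem_append.mp hmem2 with h1 | h2
          · exact absurd (by simpa using List.mem_takeWhile_imp h1) hmne
          · exact h2
        have hcm : dw.count m = (x :: t).count m := by
          rw [hdwdef]; exact count_dropWhile_eq x m _ hmne
        rw [ih dw hlen (List.Pairwise.sublist hsub h) hmdw (by rw [hcm]; exact hqm) ?_, hcm]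
        intro y hy hyq
        have hylt : y < x := hdw y hy
        apply hmax y (hsub.mem hy)
        rw [← count_dropWhile_eq x y (x :: t) (ne_of_lt hylt), ← hdwdef]
        exact hyq

theorem scanRuns_some (need m : Int) (l : List Int)
    (h : l.Pairwise (fun a b : Int => b ≤ a)) (hm : m ∈ l)
    (hqm : need ≤ (l.count m : Int))
    (hmax : ∀ y ∈ l, need ≤ (l.count y : Int) → y ≤ m) :
    scanRuns need l = List.replicate (4 - (l.count m : Int)).toNat (m <<< (3 : Nat)) :=
  scanRuns_some_aux need m l.length l (le_refl _) h hm hqm hmax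

-- main equality of the two ports
theorem ports_agree (o ks : List Int) :
    makeKeyCardFourBring o ks = makeKeyCardFourBring_alt o ks := by
  unfold makeKeyCardFourBring makeKeyCardFourBring_alt rightShiftCards
  simp only []
  set s : List Int := o.map (fun c : Int => c >>> (3 : Nat)) with hs
  set ss : List Int := PySem.List.sorted s (fun x => x) false with hss
  set d : List Int := PySem.List.sorted s (fun x => x) true with hd
  set K : Int := (ks.length : Int) with hK
  rw [getCard2NumDict_eq_counter]
  -- count facts
  have hcnt : ∀ k : Int, (PySem.Dict.counter ss).getD k 0 = ((s.count k : Nat) : Int) := by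
    intro k
    rw [PySem.Dict.getD_counter, (PySem.List.sorted_perm s (fun x => x) false).count_eq]
  have hcntd : ∀ k : Int, d.count k = s.count k := by
    intro k
    rw [hd, (PySem.List.sorted_perm s (fun x => x) true).count_eq]
  -- A's key list
  set L : List Int := PySem.List.sorted (PySem.Dict.counter ss).keys (fun x => x) false with hLdef
  have hLset : L = PySem.List.sorted (PySem.Set.ofList ss) (fun x => x) false := by
    rw [hLdef, PySem.Dict.keys_counter]
  have hLlt : L.Pairwise (· < ·) := by
    rw [hLset]; exact PySem.List.sorted_ofList_pairwise_lt ss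
  have hmemL : ∀ k : Int, k ∈ L ↔ k ∈ s := by
    intro k
    rw [hLset, PySem.List.mem_sorted, PySem.Set.mem_ofList,
      ← (PySem.List.sorted_perm s (fun x => x) false).mem_iff]
  have hmemd : ∀ k : Int, k ∈ d ↔ k ∈ s := by
    intro k
    rw [hd, PySem.List.mem_sorted]
  have hddesc : d.Pairwise (fun a b : Int => b ≤ a) := by
    rw [hd]; exact PySem.List.sorted_pairwise_rev s (fun x => x)
  -- reduce A's index loop to a fold over L
  rw [PySem.List.foldl_pyRange_zero_pyGetD L 0
    (fun sl k => if 4 - (PySem.Dict.counter ss).getD k 0 ≤ K then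
      (PySem.List.pyRange 0 (4 - (PySem.Dict.counter ss).getD k 0)).foldl
        (fun tl _ => tl ++ [k <<< (3 : Nat)]) []
      else sl) []]
  rw [overwrite_loop_eq_getLast L (fun k => 4 - (PySem.Dict.counter ss).getD k 0 ≤ K)]
  set P : Int → Bool := fun k => decide (4 - (PySem.Dict.counter ss).getD k 0 ≤ K) with hP
  have hPiff : ∀ k : Int, P k = true ↔ 4 - K ≤ ((d.count k : Nat) : Int) := by
    intro k
    rw [hP]
    simp only [decide_eq_true_eq]
    rw [hcnt k, hcntd k]
    omega
  cases hlast : (L.filter P).getLast? with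
  | none =>
    have hnilL : L.filter P = [] := List.getLast?_eq_none_iff.mp hlast
    have hnone : scanRuns (4 - K) d = [] := by
      apply scanRuns_none _ _ hddesc
      intro y hy hq
      have hyL : y ∈ L := (hmemL y).mpr ((hmemd y).mp hy)
      have : y ∈ L.filter P := List.mem_filter.mpr ⟨hyL, (hPiff y).mpr hq⟩
      rw [hnilL] at this
      simp at this
    rw [hnone]
  | some m =>
    have hmF : m ∈ L.filter P := List.mem_of_getLast? hlast
    have hmL : m ∈ L := List.mem_of_mem_filter hmF
    have hPm : P m = true := List.of_mem_filter hmF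
    have hmaxF : ∀ y ∈ L.filter P, y ≤ m :=
      getLast_is_max (L.filter P) (hLlt.filter P) hlast
    have hsome : scanRuns (4 - K) d
        = List.replicate (4 - ((d.count m : Nat) : Int)).toNat (m <<< (3 : Nat)) := by
      apply scanRuns_some _ _ _ hddesc ((hmemd m).mpr ((hmemL m).mp hmL)) ((hPiff m).mp hPm)
      intro y hy hq
      exact hmaxF y (List.mem_filter.mpr ⟨(hmemL y).mpr ((hmemd y).mp hy), (hPiff y).mpr hq⟩)
    dsimp only
    rw [hsome, repeat_loop_eq_replicate, hcnt m, hcntd m]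

-- ===== VERDICT (by name: the statement is the Claim_ definition above) =====
theorem makeKeyCardFourBring_spec : Claim_equal_makeKeyCardFourBring := by
  intro o ks _
  exact ports_agree o ks
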